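-- pv_equiv track=rewrite | github.com/jichunwei/MyGitHub-1 | saigon/rat/RuckusAutoTest/components/lib/AutoConfig.py | _remove_blank_pairs
-- ===== SOURCE A (Python) =====
-- def _remove_blank_pairs(ctrl_order, level = 0):
--     '''
--     NOTE: if exception is raised here, then double check your [...] pairs
--     '''
--     if level == 20:
--         raise Exception('Recurse too deep: %s' % level)
--
--     for i in range(len(ctrl_order)):
--         if '[' in ctrl_order[i] and ']' in ctrl_order[i + 1]:
--             #log_cfg('delete pair: %s - %s' % (ctrl_order[i], ctrl_order[i + 1]))
--             del ctrl_order[i + 1]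
--             del ctrl_order[i]
--             return _remove_blank_pairs(ctrl_order, level + 1)
--     #log_cfg(ctrl_order)
--     return ctrl_order
-- ===== SOURCE B (Python) =====
-- def _remove_blank_pairs(ctrl_order, level = 0):
--     '''
--     NOTE: if exception is raised here, then double check your [...] pairs
--     '''
--     out = []
--     for x in ctrl_order:
--         if out and '[' in out[-1] and ']' in x:
--             out.pop()
--         else:
--             out.append(x)
--     ctrl_order[:] = out
--     return ctrl_order
-- ===== Notes on version B (the rewrite author's own statement) =====
-- stated objective: alternative
-- what changed: Replaced the restart-from-scratch recursion (find first adjacent '['/']' pair, delete it, rescan the whole list, with a depth-20 recursion guard) by a single left-to-right stack pass that cancels a pair the moment it appears, needing no recursion and hence no depth guard; measured cost is the same on admissible inputs since the guard caps A at 20 rescans.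
import Mathlib
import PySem

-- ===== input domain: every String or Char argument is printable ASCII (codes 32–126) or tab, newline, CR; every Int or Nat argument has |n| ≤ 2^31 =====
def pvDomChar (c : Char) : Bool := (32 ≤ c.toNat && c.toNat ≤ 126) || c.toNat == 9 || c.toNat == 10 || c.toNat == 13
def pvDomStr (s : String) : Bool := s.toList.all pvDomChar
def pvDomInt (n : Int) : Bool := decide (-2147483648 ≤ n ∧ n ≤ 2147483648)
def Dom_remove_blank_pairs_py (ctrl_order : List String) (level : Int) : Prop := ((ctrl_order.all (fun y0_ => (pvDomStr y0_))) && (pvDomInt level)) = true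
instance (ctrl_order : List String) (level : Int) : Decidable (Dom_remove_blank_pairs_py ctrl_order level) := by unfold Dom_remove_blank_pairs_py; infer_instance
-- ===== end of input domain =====

-- B replaces A's delete-first-pair-then-rescan recursion by one stack pass (no recursion, so no
-- depth guard); equivalence is about the RETURN value: both Pythons also mutate ctrl_order in
-- place (B to the same final content on every input Pre_ admits).

-- '[' in s / ']' in s (Python substring test, exact via PySem)
def hasL (s : String) : Bool := PySem.Str.isIn "[" s
def hasR (s : String) : Bool := PySem.Str.isIn "]" s

-- ===== PORT A =====
-- A's for-loop over i in range(len) looking for the first i with '[' in l[i] and ']' in l[i+1],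
-- as the obvious structural recursion over the list (same traversal, same short-circuit):
-- none = IndexError ('[' in the last element, no earlier match), some none = loop fell through,
-- some (some i) = first matching index.
def scanPair : List String → Option (Option Nat)
  | [] => some none
  | [x] => if hasL x then none else some none
  | x :: y :: rest =>
      if hasL x && hasR y then some (some 0)
      else (scanPair (y :: rest)).map (fun o => o.map (· + 1))

theorem scanPair_found_lt : ∀ (l : List String) (i : Nat), scanPair l = some (some i) → i + 1 < l.length := by
  intro l
  induction l with
  | nil => intro i h; simp [scanPair] at h
  | cons x t ih =>
    intro i h
    match t with
    | [] => simp only [scanPair] at h; split at h <;> simp_all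
    | y :: rest =>
      simp only [scanPair] at h
      split at h
      · have hi : i = 0 := by simpa using h.symm
        subst hi; simp
      · simp only [Option.map_eq_some_iff] at h
        obtain ⟨o, ho, h2⟩ := h
        cases o with
        | none => simp at h2
        | some j =>
          simp only [Option.some.injEq] at h2
          obtain ⟨a, rfl, rfl⟩ := h2
          have := ih j ho
          simp at this ⊢
          omega

-- del ctrl_order[i+1]; del ctrl_order[i]; recurse with level+1; 'if level == 20: raise' is outside
-- Pre_, the port returns the current list there (likewise at the IndexError case).
def remove_blank_pairs_py (ctrl_order : List String) (level : Int) : List String :=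
  if level = 20 then ctrl_order  -- raise Exception('Recurse too deep'): outside Pre_
  else
    match h : scanPair ctrl_order with
    | some (some i) =>
        remove_blank_pairs_py ((ctrl_order.eraseIdx (i + 1)).eraseIdx i) (level + 1)
    | some none => ctrl_order
    | none => ctrl_order  -- IndexError: outside Pre_
termination_by ctrl_order.length
decreasing_by
  have hi := scanPair_found_lt ctrl_order i h
  have h1 : (ctrl_order.eraseIdx (i + 1)).length = ctrl_order.length - 1 := by
    rw [List.length_eraseIdx]; simp [hi]
  have h2 : ((ctrl_order.eraseIdx (i + 1)).eraseIdx i).length ≤ (ctrl_order.eraseIdx (i + 1)).length :=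
    List.length_eraseIdx_le _ _
  omega

-- ===== PORT B =====
-- Source B's for-loop over x with its 'out' list: out grows/shrinks at its END in Python, so it is kept
-- REVERSED here (head = out[-1]); the final reverse restores Python's order.
def remove_blank_pairs_py_alt (ctrl_order : List String) (level : Int) : List String :=
  (ctrl_order.foldl
    (fun out x =>
      match out with
      | t :: rest => if hasL t && hasR x then rest else x :: t :: rest
      | [] => [x])
    []).reverse

-- ===== PRECONDITION & SPEC =====
-- pvReduce l = the normal form of the pair-cancellation rewrite (one stack pass); used only to STATE
-- which inputs make A raise: A deletes exactly (|l| - |pvReduce l|)/2 pairs, raising 'Recurse too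
-- deep' as soon as the recursion depth hits exactly 20, and IndexError iff the normal form ends in
-- an element containing '['.
def pvReduceGo : List String → List String → List String
  | stack, [] => stack.reverse
  | t :: s, x :: rest => if hasL t && hasR x then pvReduceGo s rest else pvReduceGo (x :: t :: s) rest
  | [], x :: rest => pvReduceGo [x] rest

def pvReduce (l : List String) : List String := pvReduceGo [] l

def Pre_remove_blank_pairs_py (ctrl_order : List String) (level : Int) : Prop :=
  ¬ (level ≤ 20 ∧ 40 ≤ 2 * level + ((ctrl_order.length : Int) - ((pvReduce ctrl_order).length : Int)))
  ∧ (pvReduce ctrl_order).getLast?.all (fun s => !hasL s) = true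

instance (ctrl_order : List String) (level : Int) : Decidable (Pre_remove_blank_pairs_py ctrl_order level) := by
  unfold Pre_remove_blank_pairs_py; infer_instance

def pvWitness_remove_blank_pairs_py : List String × Int := (["a[", "]b", "x"], 0)

def Spec_remove_blank_pairs_py (ctrl_order : List String) (level : Int) (out : List String) : Prop := out = remove_blank_pairs_py_alt ctrl_order level
instance (ctrl_order : List String) (level : Int) (out : List String) : Decidable (Spec_remove_blank_pairs_py ctrl_order level out) := by unfold Spec_remove_blank_pairs_py; infer_instance

-- ===== CLAIM (what is proved, stated in full; the proofs are below) =====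
def Claim_equal_remove_blank_pairs_py : Prop := ∀ (ctrl_order : List String) (level : Int), Dom_remove_blank_pairs_py ctrl_order level → Pre_remove_blank_pairs_py ctrl_order level → Spec_remove_blank_pairs_py ctrl_order level (remove_blank_pairs_py ctrl_order level)


-- ===== LEMMAS AND PROOFS =====

-- B's fold step, named for the proofs.
def stepB (out : List String) (x : String) : List String :=
  match out with
  | t :: rest => if hasL t && hasR x then rest else x :: t :: rest
  | [] => [x]

theorem alt_eq_fold (l : List String) (level : Int) :
    remove_blank_pairs_py_alt l level = (List.foldl stepB [] l).reverse := rfl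

theorem pvReduceGo_eq_fold : ∀ (l acc : List String), pvReduceGo acc l = (List.foldl stepB acc l).reverse := by
  intro l
  induction l with
  | nil => intro acc; rfl
  | cons x rest ih =>
    intro acc
    match acc with
    | [] => simpa [pvReduceGo, stepB, List.foldl] using ih [x]
    | t :: s =>
      simp only [pvReduceGo, stepB, List.foldl]
      split <;> [exact ih s; exact ih (x :: t :: s)]

-- head-compatibility of the accumulator with the remaining input (no pop at the next step)
def Hc : List String → List String → Prop
  | t :: _, x :: _ => ¬ (hasL t = true ∧ hasR x = true)
  | _, _ => True

theorem step_push (acc : List String) (x : String) (l : List String) (h : Hc acc (x :: l)) :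
    stepB acc x = x :: acc := by
  match acc with
  | [] => rfl
  | t :: s =>
    simp only [stepB]
    rw [if_neg]
    simp only [Bool.and_eq_true]
    exact h

theorem fold_found : ∀ (l : List String) (i : Nat) (acc : List String),
    scanPair l = some (some i) → Hc acc l →
    List.foldl stepB acc l = List.foldl stepB acc ((l.eraseIdx (i + 1)).eraseIdx i) := by
  intro l
  induction l with
  | nil => intro i acc h; simp [scanPair] at h
  | cons x t ih =>
    intro i acc h hc
    match t with
    | [] => simp only [scanPair] at h; split at h <;> simp_all
    | y :: rest =>
      simp only [scanPair] at h
      split at h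
      · -- i = 0 : delete x and y
        rename_i hcond
        simp only [Option.some.injEq] at h
        have hi : i = 0 := by simpa using h.symm
        subst hi
        simp only [List.eraseIdx_cons_succ, List.eraseIdx_cons_zero, List.eraseIdx_cons_zero]
        have hpush := step_push acc x (y :: rest) hc
        simp only [List.foldl, hpush]
        have : stepB (x :: acc) y = acc := by
          simp only [stepB]; rw [if_pos hcond]
        rw [this]
      · rename_i hcond
        simp only [Option.map_eq_some_iff] at h
        obtain ⟨o, ho, h2⟩ := h
        cases o with
        | none => simp at h2
        | some j =>
          simp only [Option.some.injEq] at h2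
          obtain ⟨a, rfl, rfl⟩ := h2
          simp only [List.eraseIdx_cons_succ]
          have hpush := step_push acc x (y :: rest) hc
          simp only [List.foldl, hpush]
          apply ih j (x :: acc) ho
          simp only [Hc]
          intro hcontra
          exact hcond (by simp [hcontra.1, hcontra.2])

theorem fold_nomatch : ∀ (l acc : List String),
    scanPair l = some none → Hc acc l →
    List.foldl stepB acc l = l.reverse ++ acc := by
  intro l
  induction l with
  | nil => intro acc _ _; simp
  | cons x t ih =>
    intro acc h hc
    match t with
    | [] =>
      simp only [scanPair] at h
      have hpush := step_push acc x [] hc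
      simp [List.foldl, hpush]
    | y :: rest =>
      simp only [scanPair] at h
      split at h
      · simp at h
      · rename_i hcond
        simp only [Option.map_eq_some_iff] at h
        obtain ⟨o, ho, h2⟩ := h
        cases o with
        | some j => simp at h2
        | none =>
          have hpush := step_push acc x (y :: rest) hc
          rw [List.foldl_cons, hpush]
          rw [ih (x :: acc) ho (by simp only [Hc]; intro hcontra; exact hcond (by simp [hcontra.1, hcontra.2]))]
          simp

theorem fold_err : ∀ (l acc : List String),
    scanPair l = none → Hc acc l →
    List.foldl stepB acc l = l.reverse ++ acc ∧ ∃ s, l.getLast? = some s ∧ hasL s = true := by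
  intro l
  induction l with
  | nil => intro acc h; simp [scanPair] at h
  | cons x t ih =>
    intro acc h hc
    match t with
    | [] =>
      simp only [scanPair] at h
      have hx : hasL x = true := by by_contra hx; simp [hx] at h
      have hpush := step_push acc x [] hc
      exact ⟨by simp [List.foldl, hpush], x, by simp, hx⟩
    | y :: rest =>
      simp only [scanPair] at h
      split at h
      · simp at h
      · rename_i hcond
        simp only [Option.map_eq_none_iff] at h
        obtain ⟨heq, hlast⟩ := ih (x :: acc) h
          (by simp only [Hc]; intro hcontra; exact hcond (by simp [hcontra.1, hcontra.2]))
        refine ⟨?_, ?_⟩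
        · have hpush := step_push acc x (y :: rest) hc
          rw [List.foldl_cons, hpush]
          rw [heq]; simp
        · obtain ⟨s, hs, hL⟩ := hlast
          exact ⟨s, by rwa [List.getLast?_cons_cons], hL⟩

theorem pvReduce_nomatch (l : List String) (h : scanPair l = some none) : pvReduce l = l := by
  unfold pvReduce
  rw [pvReduceGo_eq_fold, fold_nomatch l [] h trivial]
  simp

theorem pvReduce_err (l : List String) (h : scanPair l = none) :
    pvReduce l = l ∧ ∃ s, l.getLast? = some s ∧ hasL s = true := by
  obtain ⟨heq, hlast⟩ := fold_err l [] h trivial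
  refine ⟨?_, hlast⟩
  unfold pvReduce
  rw [pvReduceGo_eq_fold, heq]; simp

theorem pvReduce_found (l : List String) (i : Nat) (h : scanPair l = some (some i)) :
    pvReduce ((l.eraseIdx (i + 1)).eraseIdx i) = pvReduce l := by
  unfold pvReduce
  rw [pvReduceGo_eq_fold, pvReduceGo_eq_fold, fold_found l i [] h trivial]

theorem pvReduce_length_le : ∀ (l acc : List String), (List.foldl stepB acc l).length ≤ l.length + acc.length := by
  intro l
  induction l with
  | nil => intro acc; simp
  | cons x t ih =>
    intro acc
    simp only [List.foldl]
    have := ih (stepB acc x)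
    have hstep : (stepB acc x).length ≤ acc.length + 1 := by
      match acc with
      | [] => simp [stepB]
      | a :: s => simp only [stepB]; split <;> simp <;> omega
    simp only [List.length_cons]
    omega

theorem main_lemma : ∀ (n : Nat) (l : List String) (level : Int), l.length ≤ n →
    Pre_remove_blank_pairs_py l level → remove_blank_pairs_py l level = pvReduce l := by
  intro n
  induction n with
  | zero =>
    intro l level hn hpre
    have hl : l = [] := List.eq_nil_of_length_eq_zero (Nat.le_zero.mp hn)
    subst hl
    obtain ⟨h1, _⟩ := hpre
    have hlev : ¬ level = 20 := by
      intro h; subst h; apply h1; constructor <;> simp [pvReduce, pvReduceGo]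
    rw [remove_blank_pairs_py]
    simp [hlev, scanPair, pvReduce, pvReduceGo]
  | succ m ih =>
    intro l level hn hpre
    obtain ⟨h1, h2⟩ := hpre
    have hred_le : (pvReduce l).length ≤ l.length := by
      have := pvReduce_length_le l []
      unfold pvReduce; rw [pvReduceGo_eq_fold]; simpa using this
    have hlev : ¬ level = 20 := by
      intro h; subst h
      exact h1 ⟨le_refl _, by omega⟩
    rw [remove_blank_pairs_py]
    rw [if_neg hlev]
    split
    · -- found i
      rename_i i hscan
      have hi := scanPair_found_lt l i hscan
      have hredinv := pvReduce_found l i hscan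
      have hlen1 : (l.eraseIdx (i + 1)).length = l.length - 1 := by
        rw [List.length_eraseIdx]; simp [hi]
      have hlen2 : ((l.eraseIdx (i + 1)).eraseIdx i).length = l.length - 2 := by
        rw [List.length_eraseIdx]
        have : i < (l.eraseIdx (i + 1)).length := by omega
        simp [this]; omega
      have hlenge : 2 ≤ l.length := by omega
      have hpre' : Pre_remove_blank_pairs_py ((l.eraseIdx (i + 1)).eraseIdx i) (level + 1) := by
        constructor
        · intro ⟨ha, hb⟩
          apply h1
          constructor
          · omega
          · rw [hredinv, hlen2] at hb
            omega
        · rwa [hredinv]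
      rw [ih _ _ (by omega) hpre', hredinv]
    · rename_i hscan
      exact (pvReduce_nomatch l hscan).symm
    · rename_i hscan
      obtain ⟨hredl, s, hs, hL⟩ := pvReduce_err l hscan
      exfalso
      rw [hredl] at h2
      rw [hs] at h2
      simp [hL] at h2

-- ===== VERDICT (by name: the statement is the Claim_ definition above) =====
theorem remove_blank_pairs_py_spec : Claim_equal_remove_blank_pairs_py := by
  intro l level _ hpre
  unfold Spec_remove_blank_pairs_py
  rw [main_lemma l.length l level (le_refl _) hpre, alt_eq_fold]
  unfold pvReduce
  rw [pvReduceGo_eq_fold]
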